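-- pv_equiv track=rewrite | github.com/SolitaMRSoftware/tienda | tienda.py | validacionTexto
-- ===== SOURCE A (Python) =====
-- def validacionTexto(palabra):
--         val=True
--         for elemento in palabra:
--                 if(ord (elemento) < 64 or ord(elemento) > 122):
--                         if(ord (elemento) != 32):
--                                 if(ord( elemento)!= 44):
--                                         if(ord(elemento)!=64):
--                                                 val=False
--                                                 break
--         return val
-- ===== SOURCE B (Python) =====
-- def validacionTexto(palabra):
--     resto = [c for c in palabra if c not in ' ,']
--     if not resto:
--         return True
--     return ord(min(resto)) >= 64 and ord(max(resto)) <= 122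
-- ===== Notes on version B (the rewrite author's own statement) =====
-- stated objective: alternative
-- what changed: Replaces the early-exit per-character nested-if scan with a two-stage approach: filter out the two special characters (space and comma), then decide validity by an interval test on the extremes only (min >= '@' and max <= 'z' of the remaining characters).
import Mathlib
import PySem

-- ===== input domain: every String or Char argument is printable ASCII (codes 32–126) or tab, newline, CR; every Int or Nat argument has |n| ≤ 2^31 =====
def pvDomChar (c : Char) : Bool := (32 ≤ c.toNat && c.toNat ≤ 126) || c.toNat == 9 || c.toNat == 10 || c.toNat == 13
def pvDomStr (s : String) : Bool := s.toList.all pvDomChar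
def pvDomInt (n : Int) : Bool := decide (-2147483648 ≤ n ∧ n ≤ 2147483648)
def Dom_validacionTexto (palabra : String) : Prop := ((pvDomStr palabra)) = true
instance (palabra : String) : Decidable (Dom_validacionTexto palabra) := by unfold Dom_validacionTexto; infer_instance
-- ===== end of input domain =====

-- B replaces A's early-exit nested-if scan by: filter out space and comma, then an interval test on the extremes (min/max) of what remains.

-- ===== PORT A =====
-- the for-loop with break, step for step: the nested ifs in A's order
def validacionTextoLoop : List Char → Bool
  | [] => true
  | c :: rest =>
    if c.toNat < 64 ∨ c.toNat > 122 then
      if c.toNat ≠ 32 then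
        if c.toNat ≠ 44 then
          if c.toNat ≠ 64 then false
          else validacionTextoLoop rest
        else validacionTextoLoop rest
      else validacionTextoLoop rest
    else validacionTextoLoop rest

def validacionTexto (palabra : String) : Bool := validacionTextoLoop palabra.toList

-- ===== PORT B =====
-- resto = [c for c in palabra if c not in ' ,']
-- if not resto: return True
-- return ord(min(resto)) >= 64 and ord(max(resto)) <= 122
def validacionTexto_alt (palabra : String) : Bool :=
  let resto := palabra.toList.filter (fun c => !(c == ' ' || c == ','))
  if resto.isEmpty then true
  else
    match PySem.List.min? resto (fun c => c), PySem.List.max? resto (fun c => c) with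
    | some mn, some mx => decide (64 ≤ mn.toNat) && decide (mx.toNat ≤ 122)
    | _, _ => false

-- ===== PRECONDITION & SPEC =====
def Spec_validacionTexto (palabra : String) (out : Bool) : Prop := out = validacionTexto_alt palabra
instance (palabra : String) (out : Bool) : Decidable (Spec_validacionTexto palabra out) := by unfold Spec_validacionTexto; infer_instance

-- ===== CLAIM (what is proved, stated in full; the proofs are below) =====
def Claim_equal_validacionTexto : Prop := ∀ (palabra : String), Dom_validacionTexto palabra → Spec_validacionTexto palabra (validacionTexto palabra)

-- ===== LEMMAS AND PROOFS =====

-- A's loop is 'every character has code 32, 44 or in [64,122]'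
theorem loop_eq_all (l : List Char) :
    validacionTextoLoop l
      = l.all (fun c => decide (c.toNat = 32 ∨ c.toNat = 44 ∨ (64 ≤ c.toNat ∧ c.toNat ≤ 122))) := by
  induction l with
  | nil => rfl
  | cons c rest ih =>
    rw [validacionTextoLoop, ih, List.all_cons]
    by_cases h : c.toNat = 32 ∨ c.toNat = 44 ∨ (64 ≤ c.toNat ∧ c.toNat ≤ 122)
    · simp only [h, decide_true, Bool.true_and]
      split_ifs <;> first | rfl | omega
    · simp only [h, decide_false, Bool.false_and]
      split_ifs <;> first | rfl | omega

-- B equals the same 'all' form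
theorem alt_eq_all (palabra : String) :
    validacionTexto_alt palabra
      = palabra.toList.all (fun c => decide (c.toNat = 32 ∨ c.toNat = 44 ∨ (64 ≤ c.toNat ∧ c.toNat ≤ 122))) := by
  unfold validacionTexto_alt
  set resto := palabra.toList.filter (fun c => !(c == ' ' || c == ',')) with hresto
  have hall : palabra.toList.all
      (fun c => decide (c.toNat = 32 ∨ c.toNat = 44 ∨ (64 ≤ c.toNat ∧ c.toNat ≤ 122)))
      = resto.all (fun c => decide (64 ≤ c.toNat ∧ c.toNat ≤ 122)) := by
    rw [Bool.eq_iff_iff, List.all_eq_true, List.all_eq_true]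
    constructor
    · intro h c hc
      rw [hresto, List.mem_filter] at hc
      obtain ⟨hcmem, hcf⟩ := hc
      have hne : ¬ c = ' ' ∧ ¬ c = ',' := by
        constructor <;> intro hEq <;> subst hEq <;> simp at hcf
      have := h c hcmem
      simp only [decide_eq_true_eq] at this ⊢
      rcases this with h1 | h1 | h1
      · exact absurd (by rw [← Char.ofNat_toNat c, h1] : c = ' ') hne.1
      · exact absurd (by rw [← Char.ofNat_toNat c, h1] : c = ',') hne.2
      · exact h1
    · intro h c hc
      by_cases hsp : c = ' '
      · subst hsp; simp
      by_cases hcm : c = ','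
      · subst hcm; simp
      have hmem : c ∈ resto := by
        rw [hresto, List.mem_filter]
        exact ⟨hc, by simp [hsp, hcm]⟩
      have := h c hmem
      simp only [decide_eq_true_eq] at this ⊢
      exact Or.inr (Or.inr this)
  rw [hall]
  rcases hre : resto with _ | ⟨x, t⟩
  · rfl
  · obtain ⟨mn, hmn⟩ : ∃ mn, PySem.List.min? (x :: t) (fun c => c) = some mn := by
      cases h' : PySem.List.min? (x :: t) (fun c => c) with
      | none => exact absurd h' (by simp [PySem.List.min?_eq_none_iff])
      | some m => exact ⟨m, rfl⟩
    obtain ⟨mx, hmx⟩ : ∃ mx, PySem.List.max? (x :: t) (fun c => c) = some mx := by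
      cases h' : PySem.List.max? (x :: t) (fun c => c) with
      | none => exact absurd h' (by simp [PySem.List.max?_eq_none_iff])
      | some m => exact ⟨m, rfl⟩
    have hmnmem := PySem.List.min?_mem hmn
    have hmxmem := PySem.List.max?_mem hmx
    have hmnmin := PySem.List.min?_isMin hmn
    have hmxmax := PySem.List.max?_isMax hmx
    simp only [hmn, hmx, List.isEmpty_cons, Bool.false_eq_true, if_false]
    rw [Bool.eq_iff_iff]
    simp only [Bool.and_eq_true, decide_eq_true_eq, List.all_eq_true]
    constructor
    · rintro ⟨h1, h2⟩ c hc
      have hlo : mn.toNat ≤ c.toNat := by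
        have := hmnmin c hc
        rw [Char.le_def, UInt32.le_iff_toNat_le] at this
        exact this
      have hhi : c.toNat ≤ mx.toNat := by
        have := hmxmax c hc
        rw [Char.le_def, UInt32.le_iff_toNat_le] at this
        exact this
      exact ⟨by omega, by omega⟩
    · intro h
      have h1 := h mn hmnmem
      have h2 := h mx hmxmem
      exact ⟨h1.1, h2.2⟩

-- ===== VERDICT (by name: the statement is the Claim_ definition above) =====
theorem validacionTexto_spec : Claim_equal_validacionTexto := by
  intro palabra _
  unfold Spec_validacionTexto validacionTexto
  rw [loop_eq_all, alt_eq_all]
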